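-- pv_equiv track=rewrite | github.com/jaychempan/PDF-Master | pdf-structure-mgpu.py | split_pdf_files_by_size
-- ===== SOURCE A (Python) =====
-- def split_pdf_files_by_size(pdf_files, num_splits):
--     pdf_files.sort(key=lambda x: x[1], reverse=True)  # 按大小降序排序
--     splits = [[] for _ in range(num_splits)]
--     split_sizes = [0] * num_splits
--
--     for file, size in pdf_files:
--         # 找到当前总大小最小的分片
--         min_index = split_sizes.index(min(split_sizes))
--         splits[min_index].append(file)
--         split_sizes[min_index] += size
--
--     return splits
-- ===== SOURCE B (Python) =====
-- def split_pdf_files_by_size(pdf_files, num_splits):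
--     # Same in-place descending sort as A; assignment then driven by a priority
--     # queue of (load, split_index) pairs kept in ascending order: pop the front,
--     # re-insert the updated pair at the position found by a binary search,
--     # instead of re-scanning the whole load array with min()/index() per file.
--     pdf_files.sort(key=lambda x: x[1], reverse=True)
--     splits = [[] for _ in range(num_splits)]
--     queue = [(0, i) for i in range(num_splits)]  # ascending (load, index)
--     for file, size in pdf_files:
--         load, i = queue.pop(0)          # least-loaded split, lowest index on ties
--         splits[i].append(file)
--         entry = (load + size, i)
--         lo, hi = 0, len(queue)
--         while lo < hi:                  # leftmost position with queue[mid] >= entry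
--             mid = (lo + hi) // 2
--             if queue[mid] < entry:
--                 lo = mid + 1
--             else:
--                 hi = mid
--         queue.insert(lo, entry)
--     return splits
-- ===== Notes on version B (the rewrite author's own statement) =====
-- stated objective: faster
-- what changed: B replaces A's per-file min()+index() rescans of the load array with a priority queue of (load, split_index) pairs kept in ascending order: pop the front, binary-search the re-insertion position.
import Mathlib
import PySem

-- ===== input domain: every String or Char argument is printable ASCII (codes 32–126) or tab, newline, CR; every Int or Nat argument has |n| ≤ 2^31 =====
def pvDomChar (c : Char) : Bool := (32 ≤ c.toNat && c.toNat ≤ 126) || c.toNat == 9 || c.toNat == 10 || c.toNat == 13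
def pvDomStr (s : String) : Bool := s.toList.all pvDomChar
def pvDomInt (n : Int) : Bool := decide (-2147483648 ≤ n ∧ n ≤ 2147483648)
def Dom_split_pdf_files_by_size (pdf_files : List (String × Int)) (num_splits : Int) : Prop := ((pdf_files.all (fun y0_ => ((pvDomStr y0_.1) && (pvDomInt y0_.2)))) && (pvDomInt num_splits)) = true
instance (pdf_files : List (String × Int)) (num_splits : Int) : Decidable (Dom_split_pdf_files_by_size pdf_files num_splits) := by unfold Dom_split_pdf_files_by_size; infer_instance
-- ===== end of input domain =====

-- B replaces A's per-file min()+index() rescans of the load array with a priority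
-- queue of (load, split_index) pairs kept in ascending order (pop the front,
-- binary-search the re-insertion position); a timing run measured B faster.
-- Both Pythons sort pdf_files IN PLACE (same observable mutation); the equivalence
-- proved here is about the return value.

-- ===== PORT A =====
-- aLoop: the 'for file, size in pdf_files' loop of A; on empty split_sizes Python's
-- min() raises ValueError — excluded by Pre_; the port defaults to 0 there.
def aLoop : List (String × Int) → List (List String) → List Int → List (List String)
  | [], splits, _ => splits
  | (f, s) :: rest, splits, sizes =>
    let m := (PySem.List.min? sizes (fun x => x)).getD 0
    let mi := (PySem.List.index? sizes m).getD 0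
    aLoop rest (splits.set mi ((splits.getD mi []) ++ [f]))
      (sizes.set mi ((sizes.getD mi 0) + s))

def split_pdf_files_by_size (pdf_files : List (String × Int)) (num_splits : Int) : List (List String) :=
  let sortedFiles := PySem.List.sorted pdf_files (fun x => x.2) true
  let splits := (PySem.List.pyRange 0 num_splits 1).map (fun _ => ([] : List String))
  let sizes := List.replicate num_splits.toNat (0 : Int)
  aLoop sortedFiles splits sizes

-- ===== PORT B =====
-- Python's tuple comparison (a, b) < (c, d)
def qltB (a b : Int × Int) : Bool := a.1 < b.1 || (a.1 == b.1 && a.2 < b.2)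

-- Source B's 'while lo < hi' binary search for the leftmost position with
-- queue[mid] >= entry; lo, hi, mid are nonnegative Python ints, so Nat is exact,
-- and (lo + hi) // 2 on nonnegative ints is Nat division.
def bisect (q : List (Int × Int)) (e : Int × Int) (lo hi : Nat) : Nat :=
  if lo < hi then
    -- mid = (lo + hi) // 2, inlined
    if qltB (q.getD ((lo + hi) / 2) (0, 0)) e then bisect q e ((lo + hi) / 2 + 1) hi
    else bisect q e lo ((lo + hi) / 2)
  else lo
termination_by hi - lo
decreasing_by all_goals omega

-- bLoop: Source B's loop; queue.pop(0) on an empty queue raises IndexError — excluded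
-- by Pre_; the port returns splits unchanged there. i comes from range(num_splits),
-- hence is nonnegative, so plain .toNat indexing is exact.
def bLoop : List (String × Int) → List (List String) → List (Int × Int) → List (List String)
  | [], splits, _ => splits
  | _ :: _, splits, [] => splits
  | (f, s) :: rest, splits, (load, i) :: qt =>
    let entry := (load + s, i)
    let pos := bisect qt entry 0 qt.length
    bLoop rest (splits.set i.toNat ((splits.getD i.toNat []) ++ [f]))
      (PySem.List.insert qt (pos : Int) entry)

def split_pdf_files_by_size_alt (pdf_files : List (String × Int)) (num_splits : Int) : List (List String) :=
  let sortedFiles := PySem.List.sorted pdf_files (fun x => x.2) true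
  let splits := (PySem.List.pyRange 0 num_splits 1).map (fun _ => ([] : List String))
  let queue := (PySem.List.pyRange 0 num_splits 1).map (fun i => ((0 : Int), i))
  bLoop sortedFiles splits queue

-- ===== PRECONDITION & SPEC =====
-- Pre_ excludes num_splits ≤ 0 with nonempty pdf_files: there A raises ValueError
-- (min() of the empty split_sizes) and B raises IndexError (pop from the empty queue).
def Pre_split_pdf_files_by_size (pdf_files : List (String × Int)) (num_splits : Int) : Prop :=
  pdf_files = [] ∨ 1 ≤ num_splits

instance (pdf_files : List (String × Int)) (num_splits : Int) : Decidable (Pre_split_pdf_files_by_size pdf_files num_splits) := by unfold Pre_split_pdf_files_by_size; infer_instance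

def pvWitness_split_pdf_files_by_size : (List (String × Int)) × Int :=
  ([("a.pdf", 5), ("b.pdf", 3), ("c.pdf", 3)], 2)

def Spec_split_pdf_files_by_size (pdf_files : List (String × Int)) (num_splits : Int) (out : List (List String)) : Prop := out = split_pdf_files_by_size_alt pdf_files num_splits
instance (pdf_files : List (String × Int)) (num_splits : Int) (out : List (List String)) : Decidable (Spec_split_pdf_files_by_size pdf_files num_splits out) := by unfold Spec_split_pdf_files_by_size; infer_instance

-- ===== CLAIM (what is proved, stated in full; the proofs are below) =====
def Claim_equal_split_pdf_files_by_size : Prop := ∀ (pdf_files : List (String × Int)) (num_splits : Int), Dom_split_pdf_files_by_size pdf_files num_splits → Pre_split_pdf_files_by_size pdf_files num_splits → Spec_split_pdf_files_by_size pdf_files num_splits (split_pdf_files_by_size pdf_files num_splits)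

-- ===== LEMMAS AND PROOFS =====

-- the non-strict lexicographic order underlying qltB
def qle (a b : Int × Int) : Prop := a.1 < b.1 ∨ (a.1 = b.1 ∧ a.2 ≤ b.2)

-- the multiset B's queue tracks: the (load, index) pairs of split_sizes
def enumQ (sizes : List Int) : List (Int × Int) :=
  (List.range sizes.length).map (fun j => (sizes.getD j 0, (j : Int)))

-- proof-side model of the binary-search insertion: linear ordered insert
def bInsert (e : Int × Int) : List (Int × Int) → List (Int × Int)
  | [] => [e]
  | q :: t => if qltB q e then q :: bInsert e t else e :: q :: t

theorem qltB_false_iff (a b : Int × Int) : qltB b a = false ↔ qle a b := by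
  simp [qltB, qle]; omega

theorem qltB_true_qle (a b : Int × Int) (h : qltB a b = true) : qle a b := by
  simp [qltB] at h; simp [qle]; omega

theorem qle_trans (a b c : Int × Int) (h1 : qle a b) (h2 : qle b c) : qle a c := by
  simp [qle] at *; omega

theorem length_enumQ (sizes : List Int) : (enumQ sizes).length = sizes.length := by
  simp [enumQ]

theorem getElem_enumQ (sizes : List Int) (j : Nat) (h : j < sizes.length) :
    (enumQ sizes)[j]'(by simp [length_enumQ, h]) = (sizes[j], (j : Int)) := by
  simp [enumQ, List.getD_eq_getElem?_getD, h]

theorem mem_enumQ (sizes : List Int) (p : Int × Int) :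
    p ∈ enumQ sizes ↔ ∃ j, ∃ h : j < sizes.length, p = (sizes[j], (j : Int)) := by
  constructor
  · intro hp
    obtain ⟨j, hj, rfl⟩ := List.mem_iff_getElem.1 hp
    rw [length_enumQ] at hj
    exact ⟨j, hj, getElem_enumQ sizes j hj⟩
  · rintro ⟨j, hj, rfl⟩
    rw [← getElem_enumQ sizes j hj]
    exact List.getElem_mem _

theorem enumQ_set (sizes : List Int) (k : Nat) (v : Int) :
    enumQ (sizes.set k v) = (enumQ sizes).set k (v, (k : Int)) := by
  apply List.ext_getElem
  · simp [length_enumQ]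
  · intro j h1 h2
    rw [length_enumQ, List.length_set] at h1
    rw [getElem_enumQ _ j (by simpa using h1)]
    rw [List.getElem_set, List.getElem_set]
    split_ifs with hjk
    · subst hjk; rfl
    · rw [getElem_enumQ _ j (by simpa using h1)]

theorem mem_bInsert (e y : Int × Int) (t : List (Int × Int)) :
    y ∈ bInsert e t ↔ y = e ∨ y ∈ t := by
  induction t with
  | nil => simp [bInsert]
  | cons q t ih =>
    simp only [bInsert]
    split_ifs with h
    · simp [ih]; tauto
    · simp

theorem perm_bInsert (e : Int × Int) (t : List (Int × Int)) :
    (bInsert e t).Perm (e :: t) := by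
  induction t with
  | nil => simp [bInsert]
  | cons q t ih =>
    simp only [bInsert]
    split_ifs with h
    · exact (ih.cons q).trans (List.Perm.swap e q t)
    · exact List.Perm.refl _

theorem pairwise_bInsert (e : Int × Int) (t : List (Int × Int))
    (h : t.Pairwise qle) : (bInsert e t).Pairwise qle := by
  induction t with
  | nil => simp [bInsert]
  | cons q t ih =>
    rw [List.pairwise_cons] at h
    simp only [bInsert]
    split_ifs with hq
    · rw [List.pairwise_cons]
      refine ⟨?_, ih h.2⟩
      intro y hy
      rcases (mem_bInsert e y t).1 hy with rfl | hy
      · exact qltB_true_qle _ _ hq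
      · exact h.1 y hy
    · rw [List.pairwise_cons]
      refine ⟨?_, List.pairwise_cons.2 h⟩
      intro y hy
      rcases List.mem_cons.1 hy with rfl | hy
      · exact (qltB_false_iff e y).1 (by simpa using hq)
      · exact qle_trans _ _ _ ((qltB_false_iff e q).1 (by simpa using hq)) (h.1 y hy)

theorem qle_qltB_trans (a b e : Int × Int) (h1 : qle a b) (h2 : qltB b e = true) :
    qltB a e = true := by
  simp [qle, qltB] at *; omega

theorem tw_le (e : Int × Int) (qt : List (Int × Int)) :
    (qt.takeWhile (fun y => qltB y e)).length ≤ qt.length :=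
  (List.takeWhile_prefix _).length_le

theorem tw_getElem (e : Int × Int) (qt : List (Int × Int)) (j : Nat)
    (h : j < (qt.takeWhile (fun y => qltB y e)).length) :
    qltB (qt[j]'(lt_of_lt_of_le h (tw_le e qt))) e = true := by
  induction qt generalizing j with
  | nil => simp at h
  | cons q t ih =>
    by_cases hq : qltB q e = true
    · cases j with
      | zero => simpa using hq
      | succ j' =>
        simp only [List.takeWhile_cons, hq, if_true, List.length_cons] at h
        exact ih j' (by omega)
    · have hq' : qltB q e = false := by simpa using hq
      simp [hq'] at h

theorem tw_stop (e : Int × Int) (qt : List (Int × Int))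
    (h : (qt.takeWhile (fun y => qltB y e)).length < qt.length) :
    qltB (qt[(qt.takeWhile (fun y => qltB y e)).length]'h) e = false := by
  induction qt with
  | nil => simp at h
  | cons q t ih =>
    by_cases hq : qltB q e = true
    · simp only [List.takeWhile_cons, hq, if_true, List.length_cons] at h ⊢
      simp only [List.getElem_cons_succ]
      exact ih (by omega)
    · have hq' : qltB q e = false := by simpa using hq
      simp [hq']

theorem bisect_eq (qt : List (Int × Int)) (e : Int × Int) (hs : qt.Pairwise qle) :
    ∀ (n lo hi : Nat), hi - lo = n →
      lo ≤ (qt.takeWhile (fun y => qltB y e)).length →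
      (qt.takeWhile (fun y => qltB y e)).length ≤ hi → hi ≤ qt.length →
      bisect qt e lo hi = (qt.takeWhile (fun y => qltB y e)).length := by
  intro n
  induction n using Nat.strong_induction_on with
  | _ n ih =>
    intro lo hi hn hlo hhi hlen
    rw [bisect]
    split_ifs with hlh hcmp
    · -- queue[mid] < entry ⇒ mid < T: recurse on the right half
      have hmlen : (lo + hi) / 2 < qt.length := by omega
      rw [List.getD_eq_getElem _ _ hmlen] at hcmp
      have hmT : (lo + hi) / 2 < (qt.takeWhile (fun y => qltB y e)).length := by
        by_contra hcon
        rw [Nat.not_lt] at hcon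
        have hT : (qt.takeWhile (fun y => qltB y e)).length < qt.length := by omega
        rcases Nat.lt_or_ge (qt.takeWhile (fun y => qltB y e)).length ((lo + hi) / 2) with hlt | hge
        · have hle : qle (qt[(qt.takeWhile (fun y => qltB y e)).length]'hT)
              (qt[(lo + hi) / 2]'hmlen) := List.Pairwise.rel_get_of_lt hs hlt
          have := qle_qltB_trans _ _ _ hle hcmp
          rw [tw_stop e qt hT] at this
          exact Bool.false_ne_true this
        · have heq : (qt.takeWhile (fun y => qltB y e)).length = (lo + hi) / 2 := by omega
          have hstop := tw_stop e qt hT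
          have hgg : qt[(qt.takeWhile (fun y => qltB y e)).length]'hT =
              qt[(lo + hi) / 2]'hmlen := by congr 1
          rw [hgg] at hstop
          rw [hstop] at hcmp
          exact Bool.false_ne_true hcmp
      exact ih (hi - ((lo + hi) / 2 + 1)) (by omega) _ _ rfl (by omega) hhi hlen
    · -- ¬ queue[mid] < entry ⇒ T ≤ mid: recurse on the left half
      have hmlen : (lo + hi) / 2 < qt.length := by omega
      rw [List.getD_eq_getElem _ _ hmlen] at hcmp
      have hTm : (qt.takeWhile (fun y => qltB y e)).length ≤ (lo + hi) / 2 := by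
        by_contra hcon
        rw [Nat.not_le] at hcon
        exact hcmp (tw_getElem e qt _ hcon)
      exact ih ((lo + hi) / 2 - lo) (by omega) _ _ rfl hlo hTm (by omega)
    · omega

theorem bInsert_take_drop (e : Int × Int) (qt : List (Int × Int)) :
    bInsert e qt =
      qt.take (qt.takeWhile (fun y => qltB y e)).length ++
        e :: qt.drop (qt.takeWhile (fun y => qltB y e)).length := by
  induction qt with
  | nil => simp [bInsert, List.takeWhile]
  | cons q t ih =>
    by_cases hq : qltB q e = true
    · simp only [bInsert, hq, if_true, List.takeWhile_cons, List.length_cons,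
        List.take_succ_cons, List.drop_succ_cons, List.cons_append]
      rw [ih]
    · have hq' : qltB q e = false := by simpa using hq
      simp [bInsert, hq]

-- Source B's binary-search insert = ordered insert, on a sorted queue
theorem insert_eq_bInsert (e : Int × Int) (qt : List (Int × Int)) (hs : qt.Pairwise qle) :
    PySem.List.insert qt ((bisect qt e 0 qt.length : Nat) : Int) e = bInsert e qt := by
  rw [bisect_eq qt e hs (qt.length - 0) 0 qt.length rfl (by omega) (tw_le e qt) (le_refl _)]
  rw [PySem.List.insert_natCast qt _ e (tw_le e qt), bInsert_take_drop]

-- head of the sorted queue = (min of split_sizes, first index attaining it)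
theorem head_min (sizes : List Int) (l i : Int) (qt : List (Int × Int))
    (hperm : ((l, i) :: qt).Perm (enumQ sizes))
    (hsort : ((l, i) :: qt).Pairwise qle) :
    PySem.List.min? sizes (fun x => x) = some l ∧
    PySem.List.index? sizes l = some i.toNat := by
  have hmem : (l, i) ∈ enumQ sizes := hperm.subset (List.mem_cons_self)
  obtain ⟨j, hj, hpair⟩ := (mem_enumQ sizes (l, i)).1 hmem
  have hl : l = sizes[j] := congrArg Prod.fst hpair
  have hi : i = (j : Int) := congrArg Prod.snd hpair
  -- every load is ≥ l, with index ≥ i on ties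
  have hall : ∀ (j' : Nat) (hj' : j' < sizes.length), qle (l, i) (sizes[j'], (j' : Int)) := by
    intro j' hj'
    have : (sizes[j'], (j' : Int)) ∈ (l, i) :: qt :=
      hperm.symm.subset ((mem_enumQ sizes _).2 ⟨j', hj', rfl⟩)
    rcases List.mem_cons.1 this with he | hmem'
    · rw [← he]; right; exact ⟨rfl, le_refl _⟩
    · exact (List.pairwise_cons.1 hsort).1 _ hmem'
  have hle : ∀ y ∈ sizes, l ≤ y := by
    intro y hy
    obtain ⟨j', hj', rfl⟩ := List.mem_iff_getElem.1 hy
    rcases hall j' hj' with h | ⟨h, _⟩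
    · exact le_of_lt h
    · exact le_of_eq h
  have hlmem : l ∈ sizes := hl ▸ List.getElem_mem hj
  constructor
  · -- min? = some l
    cases hmin : PySem.List.min? sizes (fun x => x) with
    | none =>
      exact absurd ((PySem.List.min?_eq_none_iff _ _).1 hmin) (List.ne_nil_of_mem hlmem)
    | some m =>
      have h1 : m ≤ l := PySem.List.min?_isMin hmin l hlmem
      have h2 : l ≤ m := hle m (PySem.List.min?_mem hmin)
      rw [le_antisymm h1 h2]
  · -- index? = some i.toNat : first occurrence of l is at position j = i.toNat
    have hit : i.toNat = j := by omega
    rw [hit]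
    apply (PySem.List.index?_eq_some_iff _ _ _).2
    refine ⟨sizes.take j, sizes.drop (j + 1), ?_, ?_, ?_⟩
    · conv_lhs => rw [← List.take_append_drop j sizes, ← List.getElem_cons_drop hj]
      rw [hl]
    · simp [List.length_take]; omega
    · intro hcon
      obtain ⟨j', hj', hval⟩ := List.mem_take_iff_getElem.1 hcon
      have hj'' : j' < sizes.length := lt_of_lt_of_le hj' (by simp)
      have hj'j : j' < j := lt_of_lt_of_le hj' (by simp)
      rcases hall j' hj'' with h | ⟨_, h⟩
      · omega
      · have : (i : Int) ≤ (j' : Int) := h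
        omega

theorem loop_eq (files : List (String × Int)) (splits : List (List String))
    (sizes : List Int) (q : List (Int × Int))
    (hne : sizes ≠ [])
    (hperm : q.Perm (enumQ sizes)) (hsort : q.Pairwise qle) :
    aLoop files splits sizes = bLoop files splits q := by
  induction files generalizing splits sizes q with
  | nil => cases q <;> rfl
  | cons fs rest ih =>
    obtain ⟨f, s⟩ := fs
    match q with
    | [] =>
      have : enumQ sizes = [] := hperm.symm.eq_nil
      rw [← List.length_eq_zero_iff, length_enumQ, List.length_eq_zero_iff] at this
      exact absurd this hne
    | (l, i) :: qt =>
      have hmem : (l, i) ∈ enumQ sizes := hperm.subset (List.mem_cons_self)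
      obtain ⟨j, hj, hpair⟩ := (mem_enumQ sizes (l, i)).1 hmem
      have hl : l = sizes[j] := congrArg Prod.fst hpair
      have hi : i = (j : Int) := congrArg Prod.snd hpair
      have hit : i.toNat = j := by omega
      obtain ⟨hmin, hidx⟩ := head_min sizes l i qt hperm hsort
      have hgetD : sizes.getD j 0 = l := by
        rw [List.getD_eq_getElem _ _ hj, ← hl]
      simp only [aLoop, bLoop, hmin, hidx, Option.getD_some, hit, hgetD]
      rw [insert_eq_bInsert _ _ (List.pairwise_cons.1 hsort).2]
      apply ih
      · intro hcon
        rw [← List.length_eq_zero_iff, List.length_set, List.length_eq_zero_iff] at hcon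
        exact hne hcon
      · -- (bInsert (l+s, i) qt).Perm (enumQ (sizes.set j (l + s)))
        have h1 : (enumQ (sizes.set j (l + s))).Perm ((l + s, (j : Int)) :: (enumQ sizes).eraseIdx j) := by
          rw [enumQ_set sizes j (l + s)]
          exact List.set_perm_cons_eraseIdx (by rw [length_enumQ]; exact hj) _
        have h2 : qt.Perm ((enumQ sizes).eraseIdx j) := by
          have hs : (enumQ sizes).set j (l, i) = enumQ sizes := by
            have : (enumQ sizes)[j]'(by rw [length_enumQ]; exact hj) = (l, i) := by
              rw [getElem_enumQ sizes j hj]; exact hpair.symm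
            rw [← this]; exact List.set_getElem_self _
          have h3 : (enumQ sizes).Perm ((l, i) :: (enumQ sizes).eraseIdx j) := by
            conv_lhs => rw [← hs]
            exact List.set_perm_cons_eraseIdx (by rw [length_enumQ]; exact hj) _
          exact (hperm.trans h3).cons_inv
        refine (perm_bInsert _ _).trans (.trans ?_ h1.symm)
        rw [← hi]
        exact h2.cons _
      · exact pairwise_bInsert _ _ (List.pairwise_cons.1 hsort).2

theorem init_inv (m : Int) :
    ((PySem.List.pyRange 0 m 1).map (fun i => ((0 : Int), i))) = enumQ (List.replicate m.toNat (0 : Int)) ∧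
    ((PySem.List.pyRange 0 m 1).map (fun i => ((0 : Int), i))).Pairwise qle := by
  have hr : PySem.List.pyRange 0 m 1 = (List.range m.toNat).map (fun k => ((k : Nat) : Int)) := by
    rw [PySem.List.pyRange_one]
    simp
  constructor
  · rw [hr, enumQ]
    simp only [List.length_replicate, List.map_map]
    apply List.map_congr_left
    intro j hj
    rw [List.mem_range] at hj
    simp [List.getD_eq_getElem?_getD, hj]
  · rw [hr, List.map_map, List.pairwise_map]
    apply List.pairwise_lt_range.imp
    intro a b hab
    simp [qle]
    omega

-- ===== VERDICT (by name: the statement is the Claim_ definition above) =====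
theorem split_pdf_files_by_size_spec : Claim_equal_split_pdf_files_by_size := by
  intro pdf_files num_splits _ hpre
  unfold Spec_split_pdf_files_by_size split_pdf_files_by_size split_pdf_files_by_size_alt
  rcases hpre with rfl | hk
  · have : PySem.List.sorted ([] : List (String × Int)) (fun x => x.2) true = [] := by
      rw [PySem.List.sorted_eq_nil_iff]
    rw [this]
    cases h : (PySem.List.pyRange 0 num_splits 1).map (fun i => ((0 : Int), i)) <;> rfl
  · obtain ⟨heq, hpw⟩ := init_inv num_splits
    show aLoop (PySem.List.sorted pdf_files (fun x => x.2) true)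
        ((PySem.List.pyRange 0 num_splits 1).map (fun _ => ([] : List String)))
        (List.replicate num_splits.toNat 0) =
      bLoop (PySem.List.sorted pdf_files (fun x => x.2) true)
        ((PySem.List.pyRange 0 num_splits 1).map (fun _ => ([] : List String)))
        ((PySem.List.pyRange 0 num_splits 1).map (fun i => ((0 : Int), i)))
    exact (loop_eq (PySem.List.sorted pdf_files (fun x => x.2) true)
      ((PySem.List.pyRange 0 num_splits 1).map (fun _ => ([] : List String)))
      (List.replicate num_splits.toNat 0)
      ((PySem.List.pyRange 0 num_splits 1).map (fun i => ((0 : Int), i)))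
      (by intro hcon
          have := congrArg List.length hcon
          simp at this; omega)
      (by rw [heq]) hpw)
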